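-- pv_equiv track=rewrite | github.com/Logikkaa/DMS_chapterwise_codes | chap_4_app/8.py | simulate_placement_and_collision
-- ===== SOURCE A (Python) =====
-- def simulate_placement_and_collision(m, n):
--     keys = [0] * m
--     for k in range(1, n + 1):
--         location = k % m
--         if keys[location] == 1:
--             return True
--         keys[location] = 1
--     return False
-- ===== SOURCE B (Python) =====
-- def simulate_placement_and_collision(m, n):
--     # Closed form: keys 1..n land on distinct slots k % m for the first m keys,
--     # so the first collision happens exactly at key m+1; an empty/invalid table holds no key.
--     return m >= 1 and n > m
-- ===== Notes on version B (the rewrite author's own statement) =====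
-- stated objective: faster
-- what changed: Replaced the O(min(n,m)) table simulation with the closed form m >= 1 and n > m (first collision occurs exactly at key m+1 by pigeonhole on residues).
import Mathlib
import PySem

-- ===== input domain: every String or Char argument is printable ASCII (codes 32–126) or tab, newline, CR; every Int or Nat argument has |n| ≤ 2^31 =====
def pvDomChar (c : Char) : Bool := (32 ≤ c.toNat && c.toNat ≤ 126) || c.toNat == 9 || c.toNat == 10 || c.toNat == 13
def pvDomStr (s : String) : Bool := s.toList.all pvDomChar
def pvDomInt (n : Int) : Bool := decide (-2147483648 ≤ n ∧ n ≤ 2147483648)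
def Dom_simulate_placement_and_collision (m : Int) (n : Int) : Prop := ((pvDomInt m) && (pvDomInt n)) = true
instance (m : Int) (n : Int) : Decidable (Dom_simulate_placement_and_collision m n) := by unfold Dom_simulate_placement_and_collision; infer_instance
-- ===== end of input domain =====

-- B replaces the table simulation by the closed form `m >= 1 and n > m` (first collision is at key m+1).

-- ===== PORT A =====
-- the for-loop `for k in range(1, n+1)` with early return, as recursion on the
-- number of remaining iterations (range is lazy in Python, so it is not materialized here either);
-- a Python list is an array, so keys is an Array: [0]*m is mkArray, and keys[location] /
-- keys[location] = 1 are exact for 0 ≤ location < m, which holds whenever m ≥ 1 (i.e. under Pre_)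
def simAux (m : Int) : Nat → Int → Array Int → Bool
  | 0, _, _ => false
  | fuel + 1, k, keys =>
    let location := PySem.Int.mod k m
    if keys.getD location.toNat 0 = 1 then true
    else simAux m fuel (k + 1) (keys.setIfInBounds location.toNat 1)

def simulate_placement_and_collision (m : Int) (n : Int) : Bool :=
  simAux m ((n + 1) - 1).toNat 1 (Array.replicate m.toNat 0)

-- ===== PORT B =====
def simulate_placement_and_collision_alt (m : Int) (n : Int) : Bool :=
  decide (1 ≤ m) && decide (m < n)

-- ===== PRECONDITION & SPEC =====
-- Pre_ excludes exactly the inputs where A raises: m ≤ 0 with n ≥ 1 (ZeroDivisionError for m = 0,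
-- IndexError for m < 0 on the empty keys list).
def Pre_simulate_placement_and_collision (m : Int) (n : Int) : Prop := 1 ≤ m ∨ n ≤ 0
instance (m : Int) (n : Int) : Decidable (Pre_simulate_placement_and_collision m n) := by
  unfold Pre_simulate_placement_and_collision; infer_instance

def pvWitness_simulate_placement_and_collision : Int × Int := (3, 5)

def Spec_simulate_placement_and_collision (m : Int) (n : Int) (out : Bool) : Prop :=
  out = simulate_placement_and_collision_alt m n
instance (m : Int) (n : Int) (out : Bool) : Decidable (Spec_simulate_placement_and_collision m n out) := by
  unfold Spec_simulate_placement_and_collision; infer_instance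

-- ===== CLAIM (what is proved, stated in full; the proofs are below) =====
def Claim_equal_simulate_placement_and_collision : Prop :=
  ∀ (m : Int) (n : Int), Dom_simulate_placement_and_collision m n →
    Pre_simulate_placement_and_collision m n →
    Spec_simulate_placement_and_collision m n (simulate_placement_and_collision m n)

-- ===== LEMMAS AND PROOFS =====

-- the keys list after the first j keys have been placed (0 ≤ j ≤ m):
-- slots 1..j are marked; slot 0 is marked exactly when j = m
def marks (m j : Int) : List Int :=
  (List.range m.toNat).map (fun (i : Nat) => if (1 ≤ (i : Int) ∧ (i : Int) ≤ j) ∨ ((i : Int) = 0 ∧ j = m) then 1 else 0)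

lemma length_marks (m j : Int) : (marks m j).length = m.toNat := by
  simp [marks]

lemma arr_getD (xs : List Int) (i : Nat) (d : Int) : xs.toArray.getD i d = xs.getD i d := by
  simp [Array.getD, List.getD_eq_getElem?_getD]
  split_ifs with h
  · simp [List.getElem?_eq_getElem h]
  · rw [List.getElem?_eq_none (by simpa using Nat.le_of_not_lt h)]; rfl

lemma getD_marks (m j i : Int) (h0 : 0 ≤ i) (h1 : i < m) :
    (marks m j).toArray.getD i.toNat 0 =
      if (1 ≤ i ∧ i ≤ j) ∨ (i = 0 ∧ j = m) then 1 else 0 := by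
  have hlt : i.toNat < m.toNat := by omega
  rw [arr_getD]
  rw [List.getD_eq_getElem _ _ (by simpa [length_marks] using hlt)]
  simp only [marks, List.getElem_map, List.getElem_range]
  rw [Int.toNat_of_nonneg h0]

lemma mod_id (a m : Int) (h0 : 0 ≤ a) (h1 : a < m) : PySem.Int.mod a m = a := by
  rw [PySem.Int.mod_eq_emod_of_pos (by omega)]
  exact Int.emod_eq_of_lt h0 h1

lemma arr_set (xs : List Int) (i : Nat) (v : Int) :
    xs.toArray.setIfInBounds i v = (xs.set i v).toArray := by
  simp

lemma set_marks (m j : Int) (h0 : 0 ≤ j) (h1 : j < m) :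
    (marks m j).set (PySem.Int.mod (j + 1) m).toNat 1 = marks m (j + 1) := by
  rcases eq_or_lt_of_le (show j + 1 ≤ m by omega) with heq | hlt
  · -- j + 1 = m: location is 0
    have hmod : PySem.Int.mod (j + 1) m = 0 := by
      rw [PySem.Int.mod_eq_emod_of_pos (by omega), heq, Int.emod_self]
    rw [hmod]
    apply List.ext_getElem
    · simp [marks]
    · intro k hk hk'
      simp only [List.getElem_set, marks, List.getElem_map, List.getElem_range,
        List.length_set, List.length_map, List.length_range] at hk ⊢
      split_ifs <;> omega
  · -- j + 1 < m: location is j + 1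
    have hmod : PySem.Int.mod (j + 1) m = j + 1 := mod_id _ _ (by omega) hlt
    rw [hmod]
    apply List.ext_getElem
    · simp [marks]
    · intro k hk hk'
      simp only [List.getElem_set, marks, List.getElem_map, List.getElem_range,
        List.length_set, List.length_map, List.length_range] at hk ⊢
      split_ifs <;> omega

lemma simAux_marks (m : Int) (hm : 1 ≤ m) :
    ∀ (fuel : Nat) (j n : Int), 0 ≤ j → j ≤ m → fuel = (n - j).toNat →
      simAux m fuel (j + 1) (marks m j).toArray = decide (m < n) := by
  intro fuel
  induction fuel with
  | zero =>
    intro j n h0 h1 hf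
    simp [simAux]
    omega
  | succ f ih =>
    intro j n h0 h1 hf
    have hjn : j < n := by omega
    by_cases hjm : j = m
    · -- key m+1 collides: location = (m+1) % m = 1 % m, which is already marked
      have hmod1 : (j + 1) % m = 1 % m := by
        rw [hjm]
        conv_lhs => rw [show m + 1 = 1 + m * 1 by ring]
        exact Int.add_mul_emod_self_left 1 m 1
      have hmod : PySem.Int.mod (j + 1) m = if m = 1 then 0 else 1 := by
        rw [PySem.Int.mod_eq_emod_of_pos (by omega), hmod1]
        split_ifs with h
        · rw [h]; rfl
        · exact Int.emod_eq_of_lt (by omega) (by omega)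
      simp only [simAux, hmod]
      rw [getD_marks m j _ (by split_ifs <;> omega) (by split_ifs <;> omega)]
      rw [if_pos (by split_ifs <;> omega)]
      simp; omega
    · -- j < m: slot (j+1) % m is free, gets marked
      have hjm' : j < m := lt_of_le_of_ne h1 hjm
      have hloc0 : 0 ≤ PySem.Int.mod (j + 1) m := PySem.Int.mod_nonneg (a := j + 1) (b := m) (by omega)
      have hlocm : PySem.Int.mod (j + 1) m < m := PySem.Int.mod_lt (a := j + 1) (b := m) (by omega)
      have hmod : PySem.Int.mod (j + 1) m = if j + 1 = m then 0 else j + 1 := by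
        split_ifs with h
        · rw [PySem.Int.mod_eq_emod_of_pos (by omega), h, Int.emod_self]
        · exact mod_id _ _ (by omega) (by omega)
      have hcond : ¬((1 ≤ PySem.Int.mod (j + 1) m ∧ PySem.Int.mod (j + 1) m ≤ j) ∨
          (PySem.Int.mod (j + 1) m = 0 ∧ j = m)) := by
        rw [hmod]; split_ifs <;> omega
      simp only [simAux]
      rw [getD_marks _ _ _ hloc0 hlocm, if_neg hcond]
      rw [if_neg (by norm_num : ¬(0 : Int) = 1)]
      rw [arr_set, set_marks m j h0 hjm']
      exact ih (j + 1) n (by omega) (by omega) (by omega)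

lemma marks_zero (m : Int) (hm : 1 ≤ m) :
    Array.replicate m.toNat (0 : Int) = (marks m 0).toArray := by
  rw [Array.replicate_eq_toArray_replicate]
  congr 1
  apply List.ext_getElem
  · simp [marks]
  · intro k hk hk'
    simp only [marks, List.getElem_replicate, List.getElem_map, List.getElem_range]
    split_ifs <;> omega

-- ===== VERDICT (by name: the statement is the Claim_ definition above) =====
theorem simulate_placement_and_collision_spec : Claim_equal_simulate_placement_and_collision := by
  intro m n _ hpre
  unfold Spec_simulate_placement_and_collision simulate_placement_and_collision
    simulate_placement_and_collision_alt
  by_cases hm : 1 ≤ m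
  · rw [marks_zero m hm]
    have := simAux_marks m hm (n - 0).toNat 0 n (by omega) (by omega) rfl
    simp only [zero_add] at this
    rw [show ((n + 1) - 1).toNat = (n - 0).toNat by omega, this]
    simp [hm]
  · have hn : n ≤ 0 := hpre.resolve_left hm
    rw [show ((n + 1) - 1).toNat = 0 by omega]
    simp [simAux, hm]
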